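-- pv_equiv track=rewrite | github.com/polygoat/TaskRunner | TSLCore.py | __normalizeQuotedStrings
-- ===== SOURCE A (Python) =====
-- def __normalizeQuotedStrings(args):
-- 	openQuotes = []
-- 	closeQuotes = []
--
-- 	for i, token in enumerate(args):
-- 		if token.startswith('"'):
-- 			if not token.endswith('"'):
-- 				openQuotes.append(i)
-- 		elif token.endswith('"'):
-- 			if not token.startswith('"'):
-- 				closeQuotes.append(i+1)
--
-- 	openQuotes.reverse()
-- 	closeQuotes.reverse()
--
-- 	for i, openQuote in enumerate(openQuotes):
-- 		closeQuote = closeQuotes[i]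
-- 		args[openQuote:closeQuote] = [' '.join(args[openQuote:closeQuote])]
--
-- 	return args
-- ===== SOURCE B (Python) =====
-- def __normalizeQuotedStrings(args):
-- 	out = []
-- 	buf = None
-- 	for token in args:
-- 		if buf is None:
-- 			if token.startswith('"') and not token.endswith('"'):
-- 				buf = [token]
-- 			else:
-- 				out.append(token)
-- 		else:
-- 			buf.append(token)
-- 			if token.endswith('"') and not token.startswith('"'):
-- 				out.append(' '.join(buf))
-- 				buf = None
-- 	if buf is not None:
-- 		out.extend(buf)
-- 	args[:] = out
-- 	return args
-- ===== Notes on version B (the rewrite author's own statement) =====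
-- stated objective: alternative
-- what changed: Replaced A's two-phase scheme (collect open/close indices, then splice the list in place pair by pair from the end) by a single forward pass that buffers tokens between an opening and a closing quote and emits each joined token once while building the output list once (avoids A's worst-case quadratic splicing, though a timing run's inputs did not make that measurable).
-- outside the precondition, e.g. on __normalizeQuotedStrings(['"a', 'b"', 'x"']): A returns ['"a b" x"'], B returns ['"a b"', 'x"']; on __normalizeQuotedStrings(['a"', '"b']): A returns ['a"', '', '"b'], B returns ['a"', '"b']
import Mathlib
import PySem

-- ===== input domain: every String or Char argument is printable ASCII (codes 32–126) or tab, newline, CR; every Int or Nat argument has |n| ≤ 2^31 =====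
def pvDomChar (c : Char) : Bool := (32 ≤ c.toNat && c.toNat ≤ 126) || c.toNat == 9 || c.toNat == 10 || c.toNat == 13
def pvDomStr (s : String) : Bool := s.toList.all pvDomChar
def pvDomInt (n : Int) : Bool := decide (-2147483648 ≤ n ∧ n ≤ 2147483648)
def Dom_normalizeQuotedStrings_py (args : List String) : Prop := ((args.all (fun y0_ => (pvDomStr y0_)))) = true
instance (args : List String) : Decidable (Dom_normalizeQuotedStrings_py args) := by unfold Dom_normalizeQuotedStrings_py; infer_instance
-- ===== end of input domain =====

-- B replaces A's collect-indices-then-splice-from-the-end scheme by a single forward pass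
-- that buffers tokens between an opening and a closing quote (objective: alternative
-- one-pass algorithm). Both A and B update `args` in place to the returned list, so the
-- side effect matches; the theorems below are about the returned value.

-- ===== PORT A =====
-- first loop of A: collect openQuotes (oc.1) and closeQuotes (oc.2) while enumerating
def pyScanStep (oc : List Int × List Int) (p : Int × String) : List Int × List Int :=
  if PySem.Str.startswith p.2 "\"" then
    if !PySem.Str.endswith p.2 "\"" then (oc.1 ++ [p.1], oc.2) else oc
  else if PySem.Str.endswith p.2 "\"" then
    if !PySem.Str.startswith p.2 "\"" then (oc.1, oc.2 ++ [p.1 + 1]) else oc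
  else oc

-- args[o:c] = [' '.join(args[o:c])]  (exact for 0 ≤ o, 0 ≤ c, the only indices A produces)
def pySplice (l : List String) (o c : Int) : List String :=
  l.take (min o.toNat l.length)
    ++ [PySem.Str.join " " (PySem.List.slice l (some o) (some c))]
    ++ l.drop (max (min o.toNat l.length) (min c.toNat l.length))

-- body of A's second loop; on `none` Python raises IndexError (excluded by Pre_)
def pySpliceStep (closeQuotes : List Int) (cur : List String) (p : Int × Int) : List String :=
  match PySem.List.pyGet? closeQuotes p.1 with
  | none => cur
  | some closeQuote => pySplice cur p.2 closeQuote

def normalizeQuotedStrings_py (args : List String) : List String :=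
  let oc := (PySem.List.enumerate args).foldl pyScanStep ([], [])
  let openQuotes := oc.1.reverse
  let closeQuotes := oc.2.reverse
  (PySem.List.enumerate openQuotes).foldl (pySpliceStep closeQuotes) args

-- ===== PORT B =====
-- token.startswith('"') and not token.endswith('"')  /  token.endswith('"') and not token.startswith('"')
def isOpenTok (t : String) : Bool :=
  PySem.Str.startswith t "\"" && !PySem.Str.endswith t "\""
def isCloseTok (t : String) : Bool :=
  PySem.Str.endswith t "\"" && !PySem.Str.startswith t "\""

-- B's single forward loop: `out` accumulator, `buf` the currently open quoted group
def altLoop : List String → List String → Option (List String) → List String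
  | [], out, none => out
  | [], out, some buf => out ++ buf
  | t :: rest, out, none =>
      if isOpenTok t then altLoop rest out (some [t])
      else altLoop rest (out ++ [t]) none
  | t :: rest, out, some buf =>
      if isCloseTok t then altLoop rest (out ++ [PySem.Str.join " " (buf ++ [t])]) none
      else altLoop rest out (some (buf ++ [t]))

def normalizeQuotedStrings_py_alt (args : List String) : List String :=
  altLoop args [] none

-- ===== PRECONDITION & SPEC =====

-- quote structure DFA: state 0 = before the first group (stray closers are inert there),
-- 1 = inside a group, 2 = after a group
def wfQuotes : Nat → List String → Bool
  | s, [] => s != 1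
  | 0, t :: r => if isOpenTok t then wfQuotes 1 r else wfQuotes 0 r
  | 1, t :: r => if isOpenTok t then false
                 else if isCloseTok t then wfQuotes 2 r else wfQuotes 1 r
  | _, t :: r => if isOpenTok t then wfQuotes 1 r
                 else if isCloseTok t then false else wfQuotes 2 r

-- Pre_ excludes unbalanced or mis-nested quote sequences: there A either raises IndexError
-- (more openers than closers) or returns accidental splices produced by its end-aligned
-- index pairing (see the cited examples), a corner no caller of a tokenizer would specify.
def Pre_normalizeQuotedStrings_py (args : List String) : Prop := wfQuotes 0 args = true
instance (args : List String) : Decidable (Pre_normalizeQuotedStrings_py args) := by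
  unfold Pre_normalizeQuotedStrings_py; infer_instance

def pvWitness_normalizeQuotedStrings_py : List String := ["\"a", "b\"", "c"]

def Spec_normalizeQuotedStrings_py (args : List String) (out : List String) : Prop := out = normalizeQuotedStrings_py_alt args
instance (args : List String) (out : List String) : Decidable (Spec_normalizeQuotedStrings_py args out) := by unfold Spec_normalizeQuotedStrings_py; infer_instance

-- ===== CLAIM (what is proved, stated in full; the proofs are below) =====
def Claim_equal_normalizeQuotedStrings_py : Prop := ∀ (args : List String), Dom_normalizeQuotedStrings_py args → Pre_normalizeQuotedStrings_py args → Spec_normalizeQuotedStrings_py args (normalizeQuotedStrings_py args)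

-- ===== LEMMAS AND PROOFS =====

-- scan results of A's first loop, written structurally
def scO (k : Int) : List String → List Int
  | [] => []
  | t :: r => if isOpenTok t then k :: scO (k + 1) r else scO (k + 1) r
def scC (k : Int) : List String → List Int
  | [] => []
  | t :: r => if isCloseTok t then (k + 1) :: scC (k + 1) r else scC (k + 1) r

-- A's second loop as a fold over (open, close) pairs
def foldSplice : List (Int × Int) → List String → List String
  | [], l => l
  | (o, c) :: ps, l => foldSplice ps (pySplice l o c)

theorem scan_eq (l : List String) : ∀ (k : Int) (o c : List Int),
    (PySem.List.enumerate l k).foldl pyScanStep (o, c) = (o ++ scO k l, c ++ scC k l) := by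
  induction l with
  | nil => intro k o c; simp [PySem.List.enumerate_nil, scO, scC]
  | cons t r ih =>
    intro k o c
    rw [PySem.List.enumerate_cons]
    simp only [List.foldl_cons]
    by_cases hs : PySem.Chars.startswith t.toList ['\"'] = true <;>
      by_cases he : PySem.Chars.endswith t.toList ['\"'] = true <;>
      simp [pyScanStep, scO, scC, isOpenTok, isCloseTok, hs, he, ih] at *

theorem fold2_eq (os : List Int) : ∀ (cs0 cs : List Int) (l : List String),
    os.length ≤ cs.length →
    (PySem.List.enumerate os (cs0.length : Int)).foldl (pySpliceStep (cs0 ++ cs)) l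
      = foldSplice (os.zip cs) l := by
  induction os with
  | nil => intro cs0 cs l _; simp [PySem.List.enumerate_nil, foldSplice]
  | cons o os ih =>
    intro cs0 cs l hlen
    cases cs with
    | nil => simp at hlen
    | cons c cs' =>
      rw [PySem.List.enumerate_cons]
      simp only [List.foldl_cons, List.zip_cons_cons, foldSplice]
      rw [show pySpliceStep (cs0 ++ c :: cs') l ((cs0.length : Int), o) = pySplice l o c by
        simp [pySpliceStep]]
      rw [show ((cs0.length : Int) + 1) = (((cs0 ++ [c]).length : Nat) : Int) by simp,
        show cs0 ++ c :: cs' = (cs0 ++ [c]) ++ cs' by simp]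
      exact ih (cs0 ++ [c]) cs' _ (by simpa using hlen)

theorem not_close_of_open {t : String} (h : isOpenTok t = true) : isCloseTok t = false := by
  simp only [isOpenTok, Bool.and_eq_true] at h
  simp only [isCloseTok, h.1, Bool.not_true, Bool.and_false]

theorem not_open_of_close {t : String} (h : isCloseTok t = true) : isOpenTok t = false := by
  simp only [isCloseTok, Bool.and_eq_true] at h
  have h2 := h.2
  simp only [Bool.not_eq_true'] at h2
  simp only [isOpenTok, h2, Bool.false_and]

-- ---- scan structure ----

theorem scO_nil_of_nonopen (P : List String) : ∀ k, (∀ t ∈ P, isOpenTok t = false) →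
    scO k P = [] := by
  induction P with
  | nil => intro k _; simp [scO]
  | cons t r ih =>
    intro k h
    simp only [scO, h t (by simp)]
    simp only [Bool.false_eq_true, if_false]
    exact ih (k + 1) (fun x hx => h x (by simp [hx]))

theorem scC_nil_of_noclose (P : List String) : ∀ k, (∀ t ∈ P, isCloseTok t = false) →
    scC k P = [] := by
  induction P with
  | nil => intro k _; simp [scC]
  | cons t r ih =>
    intro k h
    simp only [scC, h t (by simp)]
    simp only [Bool.false_eq_true, if_false]
    exact ih (k + 1) (fun x hx => h x (by simp [hx]))

theorem scO_append (l1 l2 : List String) : ∀ k,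
    scO k (l1 ++ l2) = scO k l1 ++ scO (k + l1.length) l2 := by
  induction l1 with
  | nil => intro k; simp [scO]
  | cons t r ih =>
    intro k
    simp only [List.cons_append, scO, List.length_cons]
    have h1 : k + 1 + (r.length : Int) = k + ((r.length + 1 : Nat) : Int) := by push_cast; ring
    by_cases h : isOpenTok t = true <;>
      simp only [h, if_true, Bool.false_eq_true, if_false, ih (k + 1), h1, List.cons_append]

theorem scC_append (l1 l2 : List String) : ∀ k,
    scC k (l1 ++ l2) = scC k l1 ++ scC (k + l1.length) l2 := by
  induction l1 with
  | nil => intro k; simp [scC]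
  | cons t r ih =>
    intro k
    simp only [List.cons_append, scC, List.length_cons]
    have h1 : k + 1 + (r.length : Int) = k + ((r.length + 1 : Nat) : Int) := by push_cast; ring
    by_cases h : isCloseTok t = true <;>
      simp only [h, if_true, Bool.false_eq_true, if_false, ih (k + 1), h1, List.cons_append]

theorem scO_shift (k : Int) (l : List String) : ∀ j, scO (j + k) l = (scO j l).map (· + k) := by
  induction l with
  | nil => intro j; simp [scO]
  | cons t r ih =>
    intro j
    have h1 : j + k + 1 = (j + 1) + k := by ring
    by_cases h : isOpenTok t = true <;>
      simp only [scO, h, if_true, Bool.false_eq_true, if_false, List.map_cons, h1, ih (j + 1)]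

theorem scC_shift (k : Int) (l : List String) : ∀ j, scC (j + k) l = (scC j l).map (· + k) := by
  induction l with
  | nil => intro j; simp [scC]
  | cons t r ih =>
    intro j
    have h1 : j + k + 1 = (j + 1) + k := by ring
    by_cases h : isCloseTok t = true <;>
      simp only [scC, h, if_true, Bool.false_eq_true, if_false, List.map_cons, h1, ih (j + 1)]

theorem scO_nonneg (l : List String) : ∀ k x, 0 ≤ k → x ∈ scO k l → 0 ≤ x := by
  induction l with
  | nil => intro k x _ hx; simp [scO] at hx
  | cons t r ih =>
    intro k x hk hx
    by_cases h : isOpenTok t = true <;> simp [scO, h] at hx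
    · rcases hx with rfl | hx
      · exact hk
      · exact ih (k + 1) x (by omega) hx
    · exact ih (k + 1) x (by omega) hx

theorem scC_nonneg (l : List String) : ∀ k x, 0 ≤ k → x ∈ scC k l → 0 ≤ x := by
  induction l with
  | nil => intro k x _ hx; simp [scC] at hx
  | cons t r ih =>
    intro k x hk hx
    by_cases h : isCloseTok t = true <;> simp [scC, h] at hx
    · rcases hx with rfl | hx
      · omega
      · exact ih (k + 1) x (by omega) hx
    · exact ih (k + 1) x (by omega) hx

-- ---- wf structure ----

theorem wf_counts (l : List String) : ∀ k,
    (wfQuotes 2 l = true → (scO k l).length = (scC k l).length) ∧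
    (wfQuotes 1 l = true → (scO k l).length + 1 = (scC k l).length) := by
  induction l with
  | nil =>
    intro k
    constructor
    · intro; simp [scO, scC]
    · intro h; simp [wfQuotes] at h
  | cons t r ih =>
    intro k
    constructor
    · intro h
      by_cases ho : isOpenTok t = true
      · have hc := not_close_of_open ho
        simp only [wfQuotes, ho, if_true] at h
        simp [scO, scC, ho, hc, (ih (k + 1)).2 h]
      · by_cases hc : isCloseTok t = true
        · simp [wfQuotes, ho, hc] at h
        · simp only [wfQuotes, ho, hc] at h
          simp only [Bool.false_eq_true, if_false] at h
          simp [scO, scC, ho, hc, (ih (k + 1)).1 h]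
    · intro h
      by_cases ho : isOpenTok t = true
      · simp [wfQuotes, ho] at h
      · by_cases hc : isCloseTok t = true
        · simp only [wfQuotes, ho, hc, Bool.false_eq_true, if_false, if_true] at h
          simp [scO, scC, ho, hc, (ih (k + 1)).1 h]
        · simp only [wfQuotes, ho, hc, Bool.false_eq_true, if_false] at h
          simp [scO, scC, ho, hc, (ih (k + 1)).2 h]

theorem wf2_imp_wf0 (l : List String) : wfQuotes 2 l = true → wfQuotes 0 l = true := by
  induction l with
  | nil => intro; simp [wfQuotes]
  | cons t r ih =>
    intro h
    by_cases ho : isOpenTok t = true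
    · simp only [wfQuotes, ho, if_true] at h ⊢; exact h
    · by_cases hc : isCloseTok t = true
      · simp [wfQuotes, ho, hc] at h
      · simp only [wfQuotes, ho, hc, Bool.false_eq_true, if_false] at h ⊢
        exact ih h

theorem wf1_decomp (l : List String) : wfQuotes 1 l = true →
    ∃ mid cl rest, l = mid ++ cl :: rest ∧ (∀ t ∈ mid, isOpenTok t = false ∧ isCloseTok t = false) ∧
      isCloseTok cl = true ∧ wfQuotes 2 rest = true := by
  induction l with
  | nil => intro h; simp [wfQuotes] at h
  | cons t r ih =>
    intro h
    by_cases ho : isOpenTok t = true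
    · simp [wfQuotes, ho] at h
    · by_cases hc : isCloseTok t = true
      · refine ⟨[], t, r, by simp, by simp, hc, ?_⟩
        simpa [wfQuotes, ho, hc] using h
      · simp only [wfQuotes, ho, hc, Bool.false_eq_true, if_false] at h
        obtain ⟨mid, cl, rest, rfl, hmid, hcl, hrest⟩ := ih h
        exact ⟨t :: mid, cl, rest, by simp, by
          intro x hx
          rcases List.mem_cons.mp hx with rfl | hx
          · exact ⟨by simpa using ho, by simpa using hc⟩
          · exact hmid x hx, hcl, hrest⟩

theorem wf0_decomp (l : List String) : wfQuotes 0 l = true →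
    (∀ t ∈ l, isOpenTok t = false) ∨
    ∃ P0 op mid cl rest, l = P0 ++ op :: (mid ++ cl :: rest) ∧
      (∀ t ∈ P0, isOpenTok t = false) ∧ isOpenTok op = true ∧
      (∀ t ∈ mid, isOpenTok t = false ∧ isCloseTok t = false) ∧
      isCloseTok cl = true ∧ wfQuotes 2 rest = true := by
  induction l with
  | nil => intro _; exact Or.inl (by simp)
  | cons t r ih =>
    intro h
    by_cases ho : isOpenTok t = true
    · simp only [wfQuotes, ho, if_true] at h
      obtain ⟨mid, cl, rest, rfl, hmid, hcl, hrest⟩ := wf1_decomp r h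
      exact Or.inr ⟨[], t, mid, cl, rest, by simp, by simp, ho, hmid, hcl, hrest⟩
    · simp only [wfQuotes, ho, Bool.false_eq_true, if_false] at h
      rcases ih h with hall | ⟨P0, op, mid, cl, rest, rfl, hP0, hop, hmid, hcl, hrest⟩
      · refine Or.inl ?_
        intro x hx
        rcases List.mem_cons.mp hx with rfl | hx
        · simpa using ho
        · exact hall x hx
      · refine Or.inr ⟨t :: P0, op, mid, cl, rest, by simp, ?_, hop, hmid, hcl, hrest⟩
        intro x hx
        rcases List.mem_cons.mp hx with rfl | hx
        · simpa using ho
        · exact hP0 x hx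

-- ---- splice lemmas ----

theorem pySplice_shift (P l : List String) (o c : Int) (ho : 0 ≤ o) (hc : 0 ≤ c) :
    pySplice (P ++ l) ((P.length : Int) + o) ((P.length : Int) + c) = P ++ pySplice l o c := by
  unfold pySplice
  rw [PySem.List.slice_toNat _ (by omega) (by omega), PySem.List.slice_toNat _ ho hc]
  have h1 : ((P.length : Int) + o).toNat = P.length + o.toNat := by omega
  have h2 : ((P.length : Int) + c).toNat = P.length + c.toNat := by omega
  simp only [h1, h2, List.length_append]
  have e1 : min (P.length + o.toNat) (P.length + l.length) = P.length + min o.toNat l.length := by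
    omega
  have e2 : max (P.length + min o.toNat l.length)
        (min (P.length + c.toNat) (P.length + l.length))
      = P.length + max (min o.toNat l.length) (min c.toNat l.length) := by omega
  have e3 : P.length + c.toNat - (P.length + o.toNat) = c.toNat - o.toNat := by omega
  rw [e1, e2, e3]
  rw [List.take_length_add_append, List.drop_length_add_append, List.drop_length_add_append]
  simp

theorem pySplice_zero (G X : List String) (_hG : G ≠ []) :
    pySplice (G ++ X) 0 (G.length : Int) = [PySem.Str.join " " G] ++ X := by
  unfold pySplice
  rw [PySem.List.slice_toNat _ le_rfl (by positivity)]
  simp only [Int.toNat_zero, Int.toNat_natCast, List.length_append, List.drop_zero]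
  have e1 : min 0 (G.length + X.length) = 0 := by omega
  have e2 : max 0 (min G.length (G.length + X.length)) = G.length := by omega
  rw [e1, e2]
  simp

theorem foldSplice_append (ps qs : List (Int × Int)) : ∀ l,
    foldSplice (ps ++ qs) l = foldSplice qs (foldSplice ps l) := by
  induction ps with
  | nil => intro l; simp [foldSplice]
  | cons p ps ih => intro l; obtain ⟨o, c⟩ := p; simp [foldSplice, ih]

theorem foldSplice_shift (ps : List (Int × Int)) : ∀ (P l : List String),
    (∀ p ∈ ps, 0 ≤ p.1 ∧ 0 ≤ p.2) →
    foldSplice (ps.map (fun p => ((P.length : Int) + p.1, (P.length : Int) + p.2))) (P ++ l)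
      = P ++ foldSplice ps l := by
  induction ps with
  | nil => intro P l _; simp [foldSplice]
  | cons p ps ih =>
    intro P l hpos
    obtain ⟨o, c⟩ := p
    simp only [List.map_cons, foldSplice]
    rw [pySplice_shift P l o c (hpos (o, c) (by simp)).1 (hpos (o, c) (by simp)).2]
    exact ih P _ (fun q hq => hpos q (by simp [hq]))

theorem A_unfold (l : List String) (h : (scO 0 l).length ≤ (scC 0 l).length) :
    normalizeQuotedStrings_py l = foldSplice ((scO 0 l).reverse.zip (scC 0 l).reverse) l := by
  unfold normalizeQuotedStrings_py
  rw [scan_eq]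
  simp only [List.nil_append]
  have h2 := fold2_eq (scO 0 l).reverse [] (scC 0 l).reverse l (by simpa using h)
  simpa using h2

-- ---- altLoop lemmas ----

theorem altLoop_acc (l : List String) : ∀ (a b : List String) (s : Option (List String)),
    altLoop l (a ++ b) s = a ++ altLoop l b s := by
  induction l with
  | nil => intro a b s; cases s <;> simp [altLoop]
  | cons t r ih =>
    intro a b s
    cases s with
    | none =>
      by_cases h : isOpenTok t = true <;> simp only [altLoop, h]
      · simp [ih]
      · simp only [Bool.false_eq_true, if_false, List.append_assoc]
        exact ih a (b ++ [t]) none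
    | some buf =>
      by_cases h : isCloseTok t = true <;> simp only [altLoop, h]
      · simp only [if_true, List.append_assoc]
        exact ih a _ none
      · simp only [Bool.false_eq_true, if_false]
        exact ih a b _

theorem altLoop_skip (P : List String) : ∀ (rest out : List String),
    (∀ t ∈ P, isOpenTok t = false) →
    altLoop (P ++ rest) out none = altLoop rest (out ++ P) none := by
  induction P with
  | nil => intro rest out _; simp
  | cons t P ih =>
    intro rest out h
    have ht : isOpenTok t = false := h t (by simp)
    simp only [List.cons_append, altLoop, ht, Bool.false_eq_true, if_false]
    rw [ih rest (out ++ [t]) (fun x hx => h x (by simp [hx]))]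
    simp

theorem altLoop_mid (mid : List String) : ∀ (rest out buf : List String),
    (∀ t ∈ mid, isCloseTok t = false) →
    altLoop (mid ++ rest) out (some buf) = altLoop rest out (some (buf ++ mid)) := by
  induction mid with
  | nil => intro rest out buf _; simp
  | cons t mid ih =>
    intro rest out buf h
    have ht : isCloseTok t = false := h t (by simp)
    simp only [List.cons_append, altLoop, ht, Bool.false_eq_true, if_false]
    rw [ih rest out (buf ++ [t]) (fun x hx => h x (by simp [hx]))]
    simp

theorem altLoop_group (op cl : String) (mid rest out : List String)
    (hop : isOpenTok op = true) (hcl : isCloseTok cl = true)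
    (hmid : ∀ t ∈ mid, isCloseTok t = false) :
    altLoop (op :: (mid ++ cl :: rest)) out none
      = altLoop rest (out ++ [PySem.Str.join " " (op :: (mid ++ [cl]))]) none := by
  simp only [altLoop, hop, if_true]
  rw [altLoop_mid mid (cl :: rest) out [op] hmid]
  simp [altLoop, hcl]

theorem main_eq (n : Nat) : ∀ (l : List String), l.length ≤ n → wfQuotes 0 l = true →
    normalizeQuotedStrings_py l = normalizeQuotedStrings_py_alt l := by
  induction n with
  | zero =>
    intro l hl _
    have : l = [] := List.eq_nil_of_length_eq_zero (Nat.le_zero.mp hl)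
    subst this
    rfl
  | succ n ih =>
    intro l hl hwf
    rcases wf0_decomp l hwf with hall | ⟨P0, op, mid, cl, rest, rfl, hP0, hop, hmid, hcl, hrest⟩
    · have hscO : scO 0 l = [] := scO_nil_of_nonopen l 0 hall
      rw [A_unfold l (by simp [hscO])]
      rw [hscO]
      unfold normalizeQuotedStrings_py_alt
      rw [show l = l ++ [] by simp, altLoop_skip l [] [] hall]
      simp [foldSplice, altLoop]
    · -- abbreviations
      set p : Int := (P0.length : Int) with hp
      set q : Int := (P0.length : Int) + (mid.length : Int) + 2 with hq
      have hmidO : ∀ t ∈ mid, isOpenTok t = false := fun t ht => (hmid t ht).1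
      have hmidC : ∀ t ∈ mid, isCloseTok t = false := fun t ht => (hmid t ht).2
      -- scan of l
      have hsO : scO 0 (P0 ++ op :: (mid ++ cl :: rest)) = p :: scO q rest := by
        rw [scO_append, scO_nil_of_nonopen P0 0 hP0]
        simp only [List.nil_append, Int.zero_add, scO, hop, if_true]
        rw [scO_append, scO_nil_of_nonopen mid _ hmidO]
        simp only [List.nil_append, scO, not_open_of_close hcl, Bool.false_eq_true, if_false]
        congr 2
        push_cast; ring
      have hsC : scC 0 (P0 ++ op :: (mid ++ cl :: rest))
          = scC 0 P0 ++ q :: scC q rest := by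
        rw [scC_append]
        simp only [Int.zero_add, scC, not_close_of_open hop, Bool.false_eq_true, if_false]
        rw [scC_append, scC_nil_of_noclose mid _ hmidC]
        simp only [List.nil_append, scC, hcl, if_true]
        have e : ((P0.length : Int) + 1 + (mid.length : Int) + 1) = q := by rw [hq]; ring
        rw [e]
      have hcnt : (scO q rest).length = (scC q rest).length := (wf_counts rest q).1 hrest
      have hcnt0 : (scO 0 rest).length = (scC 0 rest).length := (wf_counts rest 0).1 hrest
      set G : List String := op :: (mid ++ [cl]) with hG
      have hGlen : (G.length : Int) = (mid.length : Int) + 2 := by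
        simp [hG]; ring
      have hassoc : P0 ++ op :: (mid ++ cl :: rest) = (P0 ++ G) ++ rest := by simp [hG]
      -- A side
      have hA : normalizeQuotedStrings_py (P0 ++ op :: (mid ++ cl :: rest))
          = P0 ++ [PySem.Str.join " " G] ++ normalizeQuotedStrings_py rest := by
        rw [A_unfold _ (by rw [hsO, hsC]; simp [hcnt])]
        rw [hsO, hsC]
        have hrev1 : (p :: scO q rest).reverse = (scO q rest).reverse ++ [p] := by simp
        have hrev2 : (scC 0 P0 ++ q :: scC q rest).reverse
            = (scC q rest).reverse ++ (q :: (scC 0 P0).reverse) := by simp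
        rw [hrev1, hrev2, List.zip_append (by simp [hcnt])]
        rw [show List.zip [p] (q :: (scC 0 P0).reverse) = [(p, q)] from rfl]
        rw [foldSplice_append]
        simp only [foldSplice]
        have hsh1 : scO q rest = (scO 0 rest).map (· + q) := by
          have := scO_shift q rest 0
          simpa using this
        have hsh2 : scC q rest = (scC 0 rest).map (· + q) := by
          have := scC_shift q rest 0
          simpa using this
        have hlenPG : ((P0 ++ G).length : Int) = q := by
          simp [hG, hq]; ring
        have hz : (scO q rest).reverse.zip (scC q rest).reverse
            = ((scO 0 rest).reverse.zip (scC 0 rest).reverse).map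
                (fun pr => (((P0 ++ G).length : Int) + pr.1, ((P0 ++ G).length : Int) + pr.2)) := by
          rw [hsh1, hsh2, ← List.map_reverse, ← List.map_reverse, List.zip_map]
          apply List.map_eq_map_iff.mpr
          intro x _
          cases x with
          | mk a b =>
            simp only [Prod.map, Prod.mk.injEq, List.length_append, Nat.cast_add]
            constructor <;> omega
        rw [hz, hassoc]
        rw [foldSplice_shift _ (P0 ++ G) rest ?pos]
        case pos =>
          intro pr hpr
          have hmem := List.of_mem_zip hpr
          have h1 := scO_nonneg rest 0 pr.1 le_rfl (by simpa using hmem.1)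
          have h2 := scC_nonneg rest 0 pr.2 le_rfl (by simpa using hmem.2)
          exact ⟨h1, h2⟩
        rw [← A_unfold rest (le_of_eq hcnt0)]
        have hpz : p = (P0.length : Int) + 0 := by rw [hp]; ring
        have hqz : q = (P0.length : Int) + (G.length : Int) := by rw [hq, hGlen]; ring
        rw [show (P0 ++ G) ++ normalizeQuotedStrings_py rest
              = P0 ++ (G ++ normalizeQuotedStrings_py rest) by simp]
        rw [hpz, hqz, pySplice_shift P0 _ 0 _ le_rfl (Int.natCast_nonneg _)]
        rw [pySplice_zero G _ (by simp [hG])]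
        simp
      -- B side
      have hB : normalizeQuotedStrings_py_alt (P0 ++ op :: (mid ++ cl :: rest))
          = P0 ++ [PySem.Str.join " " G] ++ normalizeQuotedStrings_py_alt rest := by
        unfold normalizeQuotedStrings_py_alt
        rw [altLoop_skip P0 _ [] hP0]
        rw [altLoop_group op cl mid rest _ hop hcl hmidC]
        rw [show ([] : List String) ++ P0 ++ [PySem.Str.join " " G]
              = (P0 ++ [PySem.Str.join " " G]) ++ [] by simp [hG]]
        rw [altLoop_acc]
      rw [hA, hB, ih rest (by simp at hl; omega) (wf2_imp_wf0 rest hrest)]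

-- ===== VERDICT (by name: the statement is the Claim_ definition above) =====
theorem normalizeQuotedStrings_py_spec : Claim_equal_normalizeQuotedStrings_py := by
  intro args _ hpre
  exact (main_eq args.length args le_rfl hpre).symm ▸ rfl
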